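-- pv_equiv track=rewrite | github.com/AlignmentResearch/obfuscation-atlas | obfuscation_atlas/utils/visualization.py | _compress_padding
-- ===== SOURCE A (Python) =====
-- def _compress_padding(toks: list[int], pad_id: int) -> str:
--     """Compress runs of padding tokens in a token list for display."""
--     if not toks:
--         return "[]"
--     result = []
--     pad_count = 0
--     for t in toks:
--         if t == pad_id:
--             pad_count += 1
--         else:
--             if pad_count > 0:
--                 result.append(f"...<{pad_count} pad>...")
--                 pad_count = 0
--             result.append(str(t))
--     if pad_count > 0:
--         result.append(f"...<{pad_count} pad>...")
--     return "[" + ", ".join(result) + "]"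
-- ===== SOURCE B (Python) =====
-- def _compress_padding(toks: list[int], pad_id: int) -> str:
--     """Compress runs of padding tokens in a token list for display."""
--     parts = []
--     i = 0
--     n = len(toks)
--     while i < n:
--         if toks[i] == pad_id:
--             j = i
--             while j < n and toks[j] == pad_id:
--                 j += 1
--             parts.append(f"...<{j - i} pad>...")
--             i = j
--         else:
--             parts.append(str(toks[i]))
--             i += 1
--     return "[" + ", ".join(parts) + "]"
-- ===== Notes on version B (the rewrite author's own statement) =====
-- stated objective: alternative
-- what changed: Replaces the element-wise fold with a running pad_count accumulator and deferred flushes by an index-based run scanner: each padding run is measured in one inner scan and emitted immediately, so no pending-count state or post-loop flush exists, and the empty-list guard disappears.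
import Mathlib
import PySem

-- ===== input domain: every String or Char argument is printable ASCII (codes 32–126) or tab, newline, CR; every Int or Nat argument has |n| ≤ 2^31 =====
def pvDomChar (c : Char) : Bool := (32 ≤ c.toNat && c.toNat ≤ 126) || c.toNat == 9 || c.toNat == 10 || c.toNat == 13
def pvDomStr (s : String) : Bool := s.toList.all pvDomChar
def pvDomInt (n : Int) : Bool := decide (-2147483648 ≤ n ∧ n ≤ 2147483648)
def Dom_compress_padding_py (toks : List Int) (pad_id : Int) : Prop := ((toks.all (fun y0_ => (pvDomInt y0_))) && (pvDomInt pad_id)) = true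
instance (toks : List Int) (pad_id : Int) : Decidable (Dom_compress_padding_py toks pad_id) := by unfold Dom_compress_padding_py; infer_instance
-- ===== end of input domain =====

-- B replaces A's running pad_count accumulator (with deferred flushes) by an index-based
-- run scanner that measures each padding run in an inner scan and emits it immediately;
-- objective: alternative decomposition, same cost.

-- shared f-string "...<{c} pad>..."
def pvPad (c : Int) : String := "...<" ++ PySem.Int.toStr c ++ " pad>..."

-- ===== PORT A =====
-- loop body of A's for-loop: state = (result, pad_count)
def pvStepA (pad_id : Int) (st : List String × Int) (t : Int) : List String × Int :=
  if t == pad_id then (st.1, st.2 + 1)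
  else ((if st.2 > 0 then st.1 ++ [pvPad st.2] else st.1) ++ [PySem.Int.toStr t], 0)

def compress_padding_py (toks : List Int) (pad_id : Int) : String :=
  if toks = [] then "[]"
  else
    let st := toks.foldl (pvStepA pad_id) ([], 0)
    let result := if st.2 > 0 then st.1 ++ [pvPad st.2] else st.1
    "[" ++ PySem.Str.join ", " result ++ "]"

-- ===== PORT B =====
-- Source B's outer while loop: on a pad at the front, the inner while (j-scan) measures the
-- run (takeWhile/dropWhile); on a non-pad, emit str(t) and advance by one.
def pvAltParts (pad_id : Int) : List Int → List String
  | [] => []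
  | t :: rest =>
    if t == pad_id then
      pvPad (((rest.takeWhile (fun x => x == pad_id)).length : Int) + 1)
        :: pvAltParts pad_id (rest.dropWhile (fun x => x == pad_id))
    else PySem.Int.toStr t :: pvAltParts pad_id rest
termination_by l => l.length
decreasing_by
  · simp only [List.length_cons]
    have := List.length_dropWhile_le (p := fun x => x == pad_id) (l := rest)
    omega
  · simp

def compress_padding_py_alt (toks : List Int) (pad_id : Int) : String :=
  "[" ++ PySem.Str.join ", " (pvAltParts pad_id toks) ++ "]"

-- ===== PRECONDITION & SPEC =====
def Spec_compress_padding_py (toks : List Int) (pad_id : Int) (out : String) : Prop := out = compress_padding_py_alt toks pad_id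
instance (toks : List Int) (pad_id : Int) (out : String) : Decidable (Spec_compress_padding_py toks pad_id out) := by unfold Spec_compress_padding_py; infer_instance

-- ===== CLAIM (what is proved, stated in full; the proofs are below) =====
def Claim_equal_compress_padding_py : Prop := ∀ (toks : List Int) (pad_id : Int), Dom_compress_padding_py toks pad_id → Spec_compress_padding_py toks pad_id (compress_padding_py toks pad_id)

-- ===== LEMMAS AND PROOFS =====

-- A's remaining output when the pending pad_count is cnt and toks remain
def pvParts (pad_id : Int) (cnt : Int) : List Int → List String
  | [] => if cnt > 0 then [pvPad cnt] else []
  | t :: rest =>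
    if t == pad_id then pvParts pad_id (cnt + 1) rest
    else (if cnt > 0 then [pvPad cnt] else []) ++ PySem.Int.toStr t :: pvParts pad_id 0 rest

theorem pvFold_char (pad_id : Int) (toks : List Int) :
    ∀ (acc : List String) (cnt : Int),
      (let st := toks.foldl (pvStepA pad_id) (acc, cnt);
        if st.2 > 0 then st.1 ++ [pvPad st.2] else st.1) = acc ++ pvParts pad_id cnt toks := by
  induction toks with
  | nil => intro acc cnt; simp [pvParts]; split <;> simp
  | cons t rest ih =>
    intro acc cnt
    simp only [List.foldl_cons, pvParts, pvStepA]
    by_cases h : (t == pad_id) = true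
    · simp only [h, if_pos] ; exact ih acc (cnt + 1)
    · simp only [h, if_neg, Bool.false_eq_true, not_false_iff]
      rw [ih]
      split <;> simp

theorem pvParts_eq_alt (pad_id : Int) (toks : List Int) :
    (∀ cnt : Int, 0 < cnt →
        pvParts pad_id cnt toks =
          pvPad (cnt + ((toks.takeWhile (fun x => x == pad_id)).length : Int))
            :: pvAltParts pad_id (toks.dropWhile (fun x => x == pad_id)))
      ∧ pvParts pad_id 0 toks = pvAltParts pad_id toks := by
  induction toks with
  | nil =>
    constructor
    · intro cnt hc; simp [pvParts, pvAltParts, hc]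
    · simp [pvParts, pvAltParts]
  | cons t rest ih =>
    have run : ∀ cnt : Int, 0 < cnt →
        pvParts pad_id cnt (t :: rest) =
          pvPad (cnt + (((t :: rest).takeWhile (fun x => x == pad_id)).length : Int))
            :: pvAltParts pad_id ((t :: rest).dropWhile (fun x => x == pad_id)) := by
      intro cnt hc
      by_cases h : (t == pad_id) = true
      · simp only [pvParts, h, if_pos, List.takeWhile_cons, List.dropWhile_cons,
          List.length_cons]
        rw [(ih.1 (cnt + 1) (by omega))]
        congr 1
        push_cast
        ring_nf
      · simp only [pvParts, h, Bool.false_eq_true, if_neg, not_false_iff,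
          List.takeWhile_cons, List.dropWhile_cons, hc, if_pos, List.length_nil]
        rw [ih.2]
        simp [pvAltParts, h]
    refine ⟨run, ?_⟩
    by_cases h : (t == pad_id) = true
    · simp only [pvParts, h, if_pos, zero_add]
      rw [ih.1 1 (by omega)]
      simp only [pvAltParts, h, if_pos]
      congr 2
      ring
    · simp [pvParts, pvAltParts, h, ih.2]

-- ===== VERDICT (by name: the statement is the Claim_ definition above) =====
theorem compress_padding_py_spec : Claim_equal_compress_padding_py := by
  unfold Claim_equal_compress_padding_py
  intro toks pad_id _
  unfold Spec_compress_padding_py compress_padding_py compress_padding_py_alt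
  by_cases h : toks = []
  · subst h; simp [pvAltParts]; decide
  · simp only [h, if_neg, not_false_iff]
    have := pvFold_char pad_id toks [] 0
    simp only [List.nil_append] at this
    rw [this, (pvParts_eq_alt pad_id toks).2]
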